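-- pv_equiv track=rewrite | github.com/lilly1987/ComfyU-auto-script-data-cleaning | scripts/fix_yaml_quotes_char.py | escape_inner_single_quotes
-- ===== SOURCE A (Python) =====
-- from typing import List, Tuple
--
-- def escape_inner_single_quotes(text: str) -> str:
--     result: List[str] = []
--     idx = 0
--
--     while idx < len(text):
--         ch = text[idx]
--         if ch != "'":
--             result.append(ch)
--             idx += 1
--             continue
--
--         if idx + 1 < len(text) and text[idx + 1] == "'":
--             result.append("''")
--             idx += 2
--             continue
--
--         result.append("''")
--         idx += 1
--
--     return "".join(result)
-- ===== SOURCE B (Python) =====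
-- def escape_inner_single_quotes(text: str) -> str:
--     out = []
--     i = 0
--     n = len(text)
--     while i < n:
--         ch = text[i]
--         if ch != "'":
--             out.append(ch)
--             i += 1
--         else:
--             j = i
--             while j < n and text[j] == "'":
--                 j += 1
--             run = j - i
--             out.append("'" * (2 * ((run + 1) // 2)))
--             i = j
--     return "".join(out)
-- ===== Notes on version B (the rewrite author's own statement) =====
-- stated objective: alternative
-- what changed: B scans each maximal run of quotes once and emits its escaped form in closed form (2*ceil(n/2) quotes per run of n), instead of A's char-by-char two-at-a-time pairing loop.
import Mathlib
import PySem

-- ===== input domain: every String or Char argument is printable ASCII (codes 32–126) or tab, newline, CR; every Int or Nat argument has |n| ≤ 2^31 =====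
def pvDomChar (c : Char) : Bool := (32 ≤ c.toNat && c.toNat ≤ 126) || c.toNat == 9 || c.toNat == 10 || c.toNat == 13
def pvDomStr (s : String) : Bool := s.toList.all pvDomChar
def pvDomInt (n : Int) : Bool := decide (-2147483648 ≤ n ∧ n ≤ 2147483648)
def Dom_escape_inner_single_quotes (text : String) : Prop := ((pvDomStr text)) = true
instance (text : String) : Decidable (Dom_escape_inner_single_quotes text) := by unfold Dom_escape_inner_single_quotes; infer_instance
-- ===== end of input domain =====

-- B groups maximal quote runs and emits 2*ceil(n/2) quotes per run in closed form,
-- instead of A's char-by-char two-at-a-time pairing loop (alternative decomposition, same cost).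


-- ===== PORT A =====
-- A's while-loop over indices, transcribed as structural recursion on the character list:
-- non-quote → copy; quote followed by quote → emit "''", skip two; lone quote → emit "''", skip one.
def aStep : List Char → List Char
  | [] => []
  | c :: rest =>
    if c ≠ '\'' then c :: aStep rest
    else
      match rest with
      | c2 :: rest2 =>
        if c2 = '\'' then '\'' :: '\'' :: aStep rest2
        else '\'' :: '\'' :: aStep (c2 :: rest2)
      | [] => '\'' :: '\'' :: aStep []

def escape_inner_single_quotes (text : String) : String :=
  String.ofList (aStep text.toList)

-- ===== PORT B =====
-- B's run-grouping loop: on a quote, measure the maximal run (the inner while),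
-- emit 2*((run+1)/2) quotes, and continue after the run.
def bRuns : List Char → List Char
  | [] => []
  | c :: rest =>
    if c = '\'' then
      let t := (rest.takeWhile (fun d => d = '\'')).length
      List.replicate (2 * (((1 + t) + 1) / 2)) '\'' ++ bRuns (rest.drop t)
    else c :: bRuns rest
termination_by l => l.length
decreasing_by
  all_goals simp

def escape_inner_single_quotes_alt (text : String) : String :=
  String.ofList (bRuns text.toList)

-- ===== PRECONDITION & SPEC =====
def Spec_escape_inner_single_quotes (text : String) (out : String) : Prop := out = escape_inner_single_quotes_alt text
instance (text : String) (out : String) : Decidable (Spec_escape_inner_single_quotes text out) := by unfold Spec_escape_inner_single_quotes; infer_instance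

-- ===== CLAIM (what is proved, stated in full; the proofs are below) =====
def Claim_equal_escape_inner_single_quotes : Prop := ∀ (text : String), Dom_escape_inner_single_quotes text → Spec_escape_inner_single_quotes text (escape_inner_single_quotes text)

-- ===== LEMMAS AND PROOFS =====

-- A run of k further quotes after a leading quote: A's pairing loop emits 2*((k+2)/2) quotes.
lemma aStep_run (k : ℕ) : ∀ rest : List Char,
    (rest.takeWhile (fun d => d = '\'')).length = k →
    aStep ('\'' :: rest) = List.replicate (2 * ((k + 2) / 2)) '\'' ++ aStep (rest.drop k) := by
  induction k using Nat.strong_induction_on with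
  | _ k IH =>
    intro rest h
    cases rest with
    | nil =>
      have hk0 : k = 0 := by simp at h; omega
      subst hk0
      simp [aStep]
    | cons c rest2 =>
      by_cases hc : c = '\''
      · subst hc
        have ht : (rest2.takeWhile (fun d => d = '\'')).length = k - 1 := by
          simp [List.takeWhile] at h; omega
        have hk1 : 1 ≤ k := by
          simp [List.takeWhile] at h; omega
        rcases Nat.lt_or_ge k 2 with hk | hk
        · -- k = 1 : the pair is consumed, rest2 starts with a non-quote
          have hk' : k = 1 := by omega
          subst hk'
          simp [aStep]
        · -- k ≥ 2 : rest2 itself starts with a quote; apply IH at k-2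
          have h1 : 1 ≤ (rest2.takeWhile (fun d => d = '\'')).length := by omega
          cases rest2 with
          | nil => simp at h1
          | cons c2 rest3 =>
            have hc2 : c2 = '\'' := by
              by_contra hne
              simp [List.takeWhile, hne] at h1
            subst hc2
            have ht3 : (rest3.takeWhile (fun d => d = '\'')).length = k - 2 := by
              simp [List.takeWhile] at ht; omega
            have := IH (k - 2) (by omega) rest3 ht3
            have hrepl : 2 * ((k + 2) / 2) = 2 + 2 * ((k - 2 + 2) / 2) := by omega
            calc aStep ('\'' :: '\'' :: '\'' :: rest3)
                = '\'' :: '\'' :: aStep ('\'' :: rest3) := by simp [aStep]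
              _ = '\'' :: '\'' :: (List.replicate (2 * ((k - 2 + 2) / 2)) '\'' ++ aStep (rest3.drop (k - 2))) := by rw [this]
              _ = List.replicate (2 * ((k + 2) / 2)) '\'' ++ aStep (('\'' :: '\'' :: rest3).drop k) := by
                  have hd : ('\'' :: '\'' :: rest3).drop k = rest3.drop (k - 2) := by
                    have hk2 : k = (k - 2) + 2 := by omega
                    rw [hk2]
                    simp
                  rw [hd, hrepl]
                  simp [List.replicate_add]
      · -- the char after the quote is not a quote: k = 0, lone-quote branch
        have hk0 : k = 0 := by simp [List.takeWhile, hc] at h; omega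
        subst hk0
        simp [aStep, hc]

lemma aStep_eq_bRuns : ∀ (n : ℕ) (l : List Char), l.length ≤ n → aStep l = bRuns l := by
  intro n
  induction n with
  | zero => intro l hl; simp at hl; subst hl; simp [aStep, bRuns]
  | succ n IH =>
    intro l hl
    cases l with
    | nil => simp [aStep, bRuns]
    | cons c rest =>
      by_cases hc : c = '\''
      · subst hc
        have hr : rest.length + 1 ≤ n + 1 := by simpa using hl
        rw [bRuns]
        rw [aStep_run ((rest.takeWhile (fun d => d = '\'')).length) rest rfl]
        have h2 : (rest.takeWhile (fun d => d = '\'')).length + 2 = (1 + (rest.takeWhile (fun d => d = '\'')).length) + 1 := by omega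
        rw [h2]
        congr 1
        exact IH _ (by simp [List.length_drop]; omega)
      · have hr : rest.length + 1 ≤ n + 1 := by simpa using hl
        have hb : bRuns (c :: rest) = c :: bRuns rest := by rw [bRuns, if_neg hc]
        have ha : aStep (c :: rest) = c :: aStep rest := by rw [aStep.eq_def]; simp [hc]
        rw [ha, hb, IH rest (by omega)]

-- ===== VERDICT (by name: the statement is the Claim_ definition above) =====
theorem escape_inner_single_quotes_spec : Claim_equal_escape_inner_single_quotes := by
  intro text _
  unfold Spec_escape_inner_single_quotes escape_inner_single_quotes escape_inner_single_quotes_alt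
  rw [aStep_eq_bRuns text.toList.length text.toList le_rfl]
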